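-- pv_equiv track=rewrite | github.com/mosadd1X/novelforge-ai | src/utils/telegram_content_planner.py | genre_matches_campaign
-- ===== SOURCE A (Python) =====
-- def genre_matches_campaign(genre: str, campaign: str) -> bool:
--     """Check if genre matches monthly campaign."""
--     campaign_lower = campaign.lower()
--     genre_lower = genre.lower()
--
--     matches = {
--         'love stories': ['romance', 'contemporary romance', 'paranormal romance'],
--         'adventure': ['adventure', 'fantasy', 'thriller'],
--         'mystery': ['mystery', 'thriller', 'mystery thriller'],
--         'sci-fi': ['science fiction', 'speculative fiction'],
--         'summer romance': ['romance', 'contemporary fiction'],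
--         'fantasy': ['fantasy', 'epic fantasy', 'urban fantasy'],
--         'thriller': ['thriller', 'mystery thriller', 'suspense'],
--         'horror': ['horror', 'thriller']
--     }
--
--     for campaign_key, genre_list in matches.items():
--         if campaign_key in campaign_lower and genre_lower in genre_list:
--             return True
--
--     return False
-- ===== SOURCE B (Python) =====
-- # Reverse index: genre -> campaign keys whose genre list contains it (exact
-- # genre lookup once, then substring test only against the relevant keys).
-- _CAMPAIGN_KEYS_BY_GENRE = {
--     'romance': ['love stories', 'summer romance'],
--     'contemporary romance': ['love stories'],
--     'paranormal romance': ['love stories'],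
--     'adventure': ['adventure'],
--     'fantasy': ['adventure', 'fantasy'],
--     'thriller': ['adventure', 'mystery', 'thriller', 'horror'],
--     'mystery': ['mystery'],
--     'mystery thriller': ['mystery', 'thriller'],
--     'science fiction': ['sci-fi'],
--     'speculative fiction': ['sci-fi'],
--     'contemporary fiction': ['summer romance'],
--     'epic fantasy': ['fantasy'],
--     'urban fantasy': ['fantasy'],
--     'suspense': ['thriller'],
--     'horror': ['horror'],
-- }
--
--
-- def genre_matches_campaign(genre: str, campaign: str) -> bool:
--     """Check if genre matches monthly campaign."""
--     keys = _CAMPAIGN_KEYS_BY_GENRE.get(genre.lower())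
--     if keys is None:
--         return False
--     campaign_lower = campaign.lower()
--     return any(k in campaign_lower for k in keys)
-- ===== Notes on version B (the rewrite author's own statement) =====
-- stated objective: simpler
-- what changed: Replaces A's scan over all 8 campaign keys (substring test plus genre-list membership each) by a one-time reverse index genre -> relevant campaign keys: an exact dict lookup on the lowered genre (absent -> False), then a substring pass over only those keys.
import Mathlib
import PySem

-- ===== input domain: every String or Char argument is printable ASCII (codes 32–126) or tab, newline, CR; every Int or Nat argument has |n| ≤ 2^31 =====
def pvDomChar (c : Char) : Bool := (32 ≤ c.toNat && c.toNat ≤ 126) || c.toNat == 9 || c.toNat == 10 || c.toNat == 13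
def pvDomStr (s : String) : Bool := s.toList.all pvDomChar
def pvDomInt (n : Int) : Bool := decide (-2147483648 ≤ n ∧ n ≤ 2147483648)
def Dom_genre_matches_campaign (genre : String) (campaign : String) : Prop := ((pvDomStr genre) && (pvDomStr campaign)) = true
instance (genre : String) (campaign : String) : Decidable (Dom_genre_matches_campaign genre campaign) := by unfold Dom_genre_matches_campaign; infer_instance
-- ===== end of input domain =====

-- B replaces A's scan over all 8 campaign keys by one exact lookup in a
-- reverse index (genre -> relevant campaign keys) followed by a substring
-- pass over only those keys; objective: simpler.

-- ===== PORT A =====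
-- the literal `matches` dict of A, in insertion order
def gmcMatches : List (String × List String) :=
  [("love stories", ["romance", "contemporary romance", "paranormal romance"]),
   ("adventure", ["adventure", "fantasy", "thriller"]),
   ("mystery", ["mystery", "thriller", "mystery thriller"]),
   ("sci-fi", ["science fiction", "speculative fiction"]),
   ("summer romance", ["romance", "contemporary fiction"]),
   ("fantasy", ["fantasy", "epic fantasy", "urban fantasy"]),
   ("thriller", ["thriller", "mystery thriller", "suspense"]),
   ("horror", ["horror", "thriller"])]

-- the `for ... return True ... return False` loop, early return as recursion
def gmcLoop (campaign_lower : String) (genre_lower : String) :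
    List (String × List String) → Bool
  | [] => false
  | (campaign_key, genre_list) :: rest =>
    if PySem.Str.isIn campaign_key campaign_lower && genre_list.contains genre_lower then
      true
    else
      gmcLoop campaign_lower genre_lower rest

def genre_matches_campaign (genre : String) (campaign : String) : Bool :=
  let campaign_lower := PySem.Str.lower campaign
  let genre_lower := PySem.Str.lower genre
  gmcLoop campaign_lower genre_lower gmcMatches

-- ===== PORT B =====
-- module-level reverse index: genre -> campaign keys (a dict literal,
-- ported as an association list with first-match lookup)
def gmcIndex : List (String × List String) :=
  [("romance", ["love stories", "summer romance"]),
   ("contemporary romance", ["love stories"]),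
   ("paranormal romance", ["love stories"]),
   ("adventure", ["adventure"]),
   ("fantasy", ["adventure", "fantasy"]),
   ("thriller", ["adventure", "mystery", "thriller", "horror"]),
   ("mystery", ["mystery"]),
   ("mystery thriller", ["mystery", "thriller"]),
   ("science fiction", ["sci-fi"]),
   ("speculative fiction", ["sci-fi"]),
   ("contemporary fiction", ["summer romance"]),
   ("epic fantasy", ["fantasy"]),
   ("urban fantasy", ["fantasy"]),
   ("suspense", ["thriller"]),
   ("horror", ["horror"])]

-- dict.get: first-match lookup in the association list
def gmcGet? (g : String) : List (String × List String) → Option (List String)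
  | [] => none
  | (k, v) :: rest => if k == g then some v else gmcGet? g rest

def genre_matches_campaign_alt (genre : String) (campaign : String) : Bool :=
  match gmcGet? (PySem.Str.lower genre) gmcIndex with
  | none => false
  | some keys =>
    let campaign_lower := PySem.Str.lower campaign
    keys.any fun k => PySem.Str.isIn k campaign_lower

-- ===== PRECONDITION & SPEC =====
def Spec_genre_matches_campaign (genre : String) (campaign : String) (out : Bool) : Prop := out = genre_matches_campaign_alt genre campaign
instance (genre : String) (campaign : String) (out : Bool) : Decidable (Spec_genre_matches_campaign genre campaign out) := by unfold Spec_genre_matches_campaign; infer_instance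

-- ===== CLAIM (what is proved, stated in full; the proofs are below) =====
def Claim_equal_genre_matches_campaign : Prop := ∀ (genre : String) (campaign : String), Dom_genre_matches_campaign genre campaign → Spec_genre_matches_campaign genre campaign (genre_matches_campaign genre campaign)

-- ===== LEMMAS AND PROOFS =====
-- core lemma: the A-loop over the forward table equals the B-lookup in the
-- reverse index, for arbitrary (already-lowered) strings g, c
theorem gmc_loop_eq_lookup (g c : String) :
    gmcLoop c g gmcMatches =
      (match gmcGet? g gmcIndex with
       | none => false
       | some keys => keys.any fun k => PySem.Str.isIn k c) := by
  by_cases h1 : g = "romance"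
  · subst h1; simp [gmcLoop, gmcMatches, gmcGet?, gmcIndex]
  by_cases h2 : g = "contemporary romance"
  · subst h2; simp [gmcLoop, gmcMatches, gmcGet?, gmcIndex]
  by_cases h3 : g = "paranormal romance"
  · subst h3; simp [gmcLoop, gmcMatches, gmcGet?, gmcIndex]
  by_cases h4 : g = "adventure"
  · subst h4; simp [gmcLoop, gmcMatches, gmcGet?, gmcIndex]
  by_cases h5 : g = "fantasy"
  · subst h5; simp [gmcLoop, gmcMatches, gmcGet?, gmcIndex]
  by_cases h6 : g = "thriller"
  · subst h6; simp [gmcLoop, gmcMatches, gmcGet?, gmcIndex]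
  by_cases h7 : g = "mystery"
  · subst h7; simp [gmcLoop, gmcMatches, gmcGet?, gmcIndex]
  by_cases h8 : g = "mystery thriller"
  · subst h8; simp [gmcLoop, gmcMatches, gmcGet?, gmcIndex]
  by_cases h9 : g = "science fiction"
  · subst h9; simp [gmcLoop, gmcMatches, gmcGet?, gmcIndex]
  by_cases h10 : g = "speculative fiction"
  · subst h10; simp [gmcLoop, gmcMatches, gmcGet?, gmcIndex]
  by_cases h11 : g = "contemporary fiction"
  · subst h11; simp [gmcLoop, gmcMatches, gmcGet?, gmcIndex]
  by_cases h12 : g = "epic fantasy"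
  · subst h12; simp [gmcLoop, gmcMatches, gmcGet?, gmcIndex]
  by_cases h13 : g = "urban fantasy"
  · subst h13; simp [gmcLoop, gmcMatches, gmcGet?, gmcIndex]
  by_cases h14 : g = "suspense"
  · subst h14; simp [gmcLoop, gmcMatches, gmcGet?, gmcIndex]
  by_cases h15 : g = "horror"
  · subst h15; simp [gmcLoop, gmcMatches, gmcGet?, gmcIndex]
  · have h1' : ¬ "romance" = g := fun h => h1 h.symm
    have h2' : ¬ "contemporary romance" = g := fun h => h2 h.symm
    have h3' : ¬ "paranormal romance" = g := fun h => h3 h.symm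
    have h4' : ¬ "adventure" = g := fun h => h4 h.symm
    have h5' : ¬ "fantasy" = g := fun h => h5 h.symm
    have h6' : ¬ "thriller" = g := fun h => h6 h.symm
    have h7' : ¬ "mystery" = g := fun h => h7 h.symm
    have h8' : ¬ "mystery thriller" = g := fun h => h8 h.symm
    have h9' : ¬ "science fiction" = g := fun h => h9 h.symm
    have h10' : ¬ "speculative fiction" = g := fun h => h10 h.symm
    have h11' : ¬ "contemporary fiction" = g := fun h => h11 h.symm
    have h12' : ¬ "epic fantasy" = g := fun h => h12 h.symm
    have h13' : ¬ "urban fantasy" = g := fun h => h13 h.symm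
    have h14' : ¬ "suspense" = g := fun h => h14 h.symm
    have h15' : ¬ "horror" = g := fun h => h15 h.symm
    simp [gmcLoop, gmcMatches, gmcGet?, gmcIndex,
      h1, h2, h3, h4, h5, h6, h7, h8, h9, h10, h11, h12, h13, h14, h15,
      h1', h2', h3', h4', h5', h6', h7', h8', h9', h10', h11', h12', h13', h14', h15']

-- ===== VERDICT (by name: the statement is the Claim_ definition above) =====
theorem genre_matches_campaign_spec : Claim_equal_genre_matches_campaign := by
  intro genre campaign _hdom
  unfold Spec_genre_matches_campaign genre_matches_campaign genre_matches_campaign_alt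
  exact gmc_loop_eq_lookup (PySem.Str.lower genre) (PySem.Str.lower campaign)
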